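-- pv_equiv track=rewrite | github.com/harvard-lil/perma | lib/hashids.py | __consistentShuffle
-- ===== SOURCE A (Python) =====
-- def __consistentShuffle(alphabet, salt):
--     ret = ''
--
--     if type(alphabet) is list:
--         alphabet = ''.join(alphabet)
--
--     if type(salt) is list:
--         salt = ''.join(salt)
--     if type(salt) is tuple:
--         salt = ''.join('%d' % num for num in salt)
--
--     if alphabet:
--         alphabetArray = list(alphabet)
--         saltArray = list(salt)
--
--         sortingArray = []
--         for saltCharacter in saltArray:
--             sortingArray.append(ord(saltCharacter))
--
--         for i in range(len(sortingArray)):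
--             add = True
--
--             for k in range(i, len(sortingArray) + i - 1):
--                 nextIndex = (k + 1) % len(sortingArray)
--
--                 if add:
--                     sortingArray[i] += sortingArray[nextIndex] + (k * i)
--                 else:
--                     sortingArray[i] -= sortingArray[nextIndex]
--
--                 add = not add
--
--             sortingArray[i] = abs(sortingArray[i])
--
--         i = 0
--         sortingArraySize = len(sortingArray)
--         while len(alphabetArray) > 0:
--             size = len(alphabetArray)
--             pos = sortingArray[i]
--
--             if(pos >= size):
--                 pos = pos % size
--
--             ret += alphabetArray.pop(pos)
--
--             i = (i + 1) % sortingArraySize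
--
--     return ret
-- ===== SOURCE B (Python) =====
-- def __consistentShuffle(alphabet, salt):
--     if type(alphabet) is list:
--         alphabet = ''.join(alphabet)
--     if type(salt) is list:
--         salt = ''.join(salt)
--     if type(salt) is tuple:
--         salt = ''.join('%d' % num for num in salt)
--
--     if not alphabet:
--         return ''
--
--     def eps(t):
--         return 1 if t % 2 == 0 else -1
--
--     ords = [ord(c) for c in salt]
--     m = len(ords)
--     # alternating total of the original salt codes
--     total = 0
--     plus = True
--     for v in ords:
--         total = total + v if plus else total - v
--         plus = not plus
--     cnt = m // 2
--     # O(m) salt transform: running alternating prefixes replace A's inner loop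
--     sa = []
--     Q = 0    # alternating prefix of the NEW (already transformed) values
--     Pr = 0   # alternating prefix of the ORIGINAL values
--     for i in range(m):
--         v = ords[i]
--         Pr = Pr + eps(i) * v
--         w = abs(v + eps(i + 1) * (total - Pr) + eps(m - 1 - i) * Q
--                 + i * (cnt * i + cnt * (cnt - 1)))
--         sa.append(w)
--         Q = Q + eps(i) * w
--
--     # count segment tree: k-th remaining select + delete in O(log n)
--     def build(cs):
--         if len(cs) <= 1:
--             return ('L', cs[0] if cs else ' ')
--         mid = len(cs) // 2
--         return ('N', len(cs), build(cs[:mid]), build(cs[mid:]))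
--
--     def pop(t, k):
--         if t[0] == 'L':
--             return t[1], None
--         cl = t[2][1] if t[2][0] == 'N' else 1
--         if k < cl:
--             c, sub = pop(t[2], k)
--             return (c, t[3]) if sub is None else (c, ('N', t[1] - 1, sub, t[3]))
--         c, sub = pop(t[3], k - cl)
--         return (c, t[2]) if sub is None else (c, ('N', t[1] - 1, t[2], sub))
--
--     n = len(alphabet)
--     t = build(list(alphabet))
--     out = []
--     for j in range(n):
--         c, t = pop(t, sa[j % m] % (n - j))
--         out.append(c)
--     return ''.join(out)
-- ===== Notes on version B (the rewrite author's own statement) =====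
-- stated objective: faster
-- what changed: B computes the salt transform in O(m) with running alternating prefix sums (A's quadratic inner alternating loop disappears, replaced by a closed-form per index), and replaces A's repeated list.pop positional extraction by a count-augmented segment tree giving k-th-remaining select+delete in O(log n).
import Mathlib
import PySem

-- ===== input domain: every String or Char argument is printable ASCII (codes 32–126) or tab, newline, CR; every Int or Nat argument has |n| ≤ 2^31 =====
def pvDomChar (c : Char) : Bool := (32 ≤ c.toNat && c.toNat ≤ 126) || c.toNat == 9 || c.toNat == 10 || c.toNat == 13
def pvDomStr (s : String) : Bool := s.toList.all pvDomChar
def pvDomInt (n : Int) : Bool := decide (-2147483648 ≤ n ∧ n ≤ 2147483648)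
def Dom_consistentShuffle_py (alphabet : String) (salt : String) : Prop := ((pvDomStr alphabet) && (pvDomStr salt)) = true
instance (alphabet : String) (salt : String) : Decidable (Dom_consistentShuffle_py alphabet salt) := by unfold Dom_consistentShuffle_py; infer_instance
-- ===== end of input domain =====

-- B replaces A's quadratic inner alternating loop by an O(m) pass with running alternating
-- prefix sums, and A's repeated positional list.pop by a count segment tree (k-th-remaining
-- select + delete); measured faster (asymptotic: O(m + n log n) vs O(m^2 + n^2)).

-- ===== PORT A =====
-- body of the inner 'for k' loop of A: sortingArray[i] +=/-= …, flip 'add'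
def pyA_innerStep (i : Nat) (st : List Int × Bool) (k : Int) : List Int × Bool :=
  let sa := st.1
  let add := st.2
  let nextIndex := PySem.Int.mod (k + 1) (PySem.List.len sa)
  let cur := PySem.List.pyGetD sa (i : Int) 0
  let t := PySem.List.pyGetD sa nextIndex 0
  (PySem.List.pySetD sa (i : Int) (if add then cur + (t + k * (i : Int)) else cur - t), !add)

-- inner 'for k in range(i, len+i-1)' loop of A, then abs
def pyA_inner (i : Nat) (sa0 : List Int) : List Int :=
  let r := (PySem.List.pyRange (i : Int) (PySem.List.len sa0 + (i : Int) - 1) 1).foldl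
    (pyA_innerStep i) (sa0, true)
  PySem.List.pySetD r.1 (i : Int) |PySem.List.pyGetD r.1 (i : Int) 0|

-- the 'while len(alphabetArray) > 0' loop of A (pop at pos; none = Python IndexError, outside Pre_)
def pyA_while (sa : List Int) (sz : Nat) (arr : List Char) (i : Nat) (ret : List Char) : List Char :=
  if arr = [] then ret
  else
    let size : Int := PySem.List.len arr
    let pos := PySem.List.pyGetD sa (i : Int) 0
    let pos := if pos ≥ size then PySem.Int.mod pos size else pos
    match hp : PySem.List.pop? arr pos with
    | none => ret
    | some (c, rest) => pyA_while sa sz rest ((i + 1) % sz) (ret ++ [c])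
termination_by arr.length
decreasing_by
  have h := PySem.List.length_of_pop?_eq_some arr hp
  simp only at h
  omega

def consistentShuffle_py (alphabet : String) (salt : String) : String :=
  let ret : List Char := []
  if alphabet.toList = [] then String.ofList ret
  else
    let alphabetArray := alphabet.toList
    let saltArray := salt.toList
    let sortingArray : List Int := saltArray.foldl (fun acc c => acc ++ [((c.toNat : Int))]) []
    let sortingArray := (List.range sortingArray.length).foldl (fun sa i => pyA_inner i sa) sortingArray
    let sortingArraySize := sortingArray.length
    String.ofList (pyA_while sortingArray sortingArraySize alphabetArray 0 ret)

-- ===== PORT B =====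
-- eps(t) of Source B
def epsI (t : Nat) : Int := if t % 2 = 0 then 1 else -1

-- body of Source B's single salt-transform loop; state (sa, Q, Pr)
def bStep (ords : List Int) (m : Nat) (total cnt : Int) (st : List Int × Int × Int) (i : Nat) :
    List Int × Int × Int :=
  let v := ords.getD i 0
  let Pr := st.2.2 + epsI i * v
  let w := |v + epsI (i + 1) * (total - Pr) + epsI (m - 1 - i) * st.2.1
            + (i : Int) * (cnt * (i : Int) + cnt * (cnt - 1))|
  (st.1 ++ [w], st.2.1 + epsI i * w, Pr)

-- Source B's count segment tree ('L', c) / ('N', cnt, l, r)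
inductive CTree where
  | leaf : Char → CTree
  | node : Nat → CTree → CTree → CTree
deriving DecidableEq, Repr

def countT : CTree → Nat
  | .leaf _ => 1
  | .node c _ _ => c

-- Source B's build(cs)
def buildT (l : List Char) : CTree :=
  if h : l.length ≤ 1 then .leaf (l.getD 0 ' ')
  else .node l.length (buildT (l.take (l.length / 2))) (buildT (l.drop (l.length / 2)))
termination_by l.length
decreasing_by
  · simp only [List.length_take]; omega
  · simp only [List.length_drop]; omega

-- Source B's pop(t, k)
def popT : CTree → Nat → Char × Option CTree
  | .leaf c, _ => (c, none)
  | .node cnt l r, k =>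
    if k < countT l then
      match popT l k with
      | (c, none) => (c, some r)
      | (c, some l') => (c, some (.node (cnt - 1) l' r))
    else
      match popT r (k - countT l) with
      | (c, none) => (c, some l)
      | (c, some r') => (c, some (.node (cnt - 1) l r'))

-- Source B's 'for j in range(n)' extraction loop
def extractB (sa : List Int) (sz n : Nat) (j : Nat) (t : CTree) (out : List Char) : List Char :=
  if j < n then
    let pos := (PySem.Int.mod (sa.getD (j % sz) 0) ((n : Int) - (j : Int))).toNat
    match popT t pos with
    | (c, none) => out ++ [c]
    | (c, some t') => extractB sa sz n (j + 1) t' (out ++ [c])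
  else out
termination_by n - j

def consistentShuffle_py_alt (alphabet : String) (salt : String) : String :=
  if alphabet.toList = [] then "" else
  let ords : List Int := salt.toList.map (fun c => ((c.toNat : Int)))
  let m := ords.length
  let total := (ords.foldl (fun (st : Int × Bool) v =>
      ((if st.2 then st.1 + v else st.1 - v), !st.2)) (0, true)).1
  let cnt : Int := ((m / 2 : Nat) : Int)
  let sa := ((List.range m).foldl (bStep ords m total cnt) ([], 0, 0)).1
  let n := alphabet.toList.length
  String.ofList (extractB sa m n 0 (buildT alphabet.toList) [])

-- ===== PRECONDITION & SPEC =====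
-- Pre_ excludes only empty salt with a non-empty alphabet: there A raises IndexError
-- (sortingArray[0] on an empty sortingArray) and B raises ZeroDivisionError.
def Pre_consistentShuffle_py (alphabet : String) (salt : String) : Prop :=
  alphabet.toList = [] ∨ salt.toList ≠ []
instance (alphabet : String) (salt : String) : Decidable (Pre_consistentShuffle_py alphabet salt) := by
  unfold Pre_consistentShuffle_py; infer_instance
def pvWitness_consistentShuffle_py : String × String := ("abcdef", "salt")
def Spec_consistentShuffle_py (alphabet : String) (salt : String) (out : String) : Prop := out = consistentShuffle_py_alt alphabet salt
instance (alphabet : String) (salt : String) (out : String) : Decidable (Spec_consistentShuffle_py alphabet salt out) := by unfold Spec_consistentShuffle_py; infer_instance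

-- ===== CLAIM (what is proved, stated in full; the proofs are below) =====
def Claim_equal_consistentShuffle_py : Prop := ∀ (alphabet : String) (salt : String), Dom_consistentShuffle_py alphabet salt → Pre_consistentShuffle_py alphabet salt → Spec_consistentShuffle_py alphabet salt (consistentShuffle_py alphabet salt)

-- ===== LEMMAS AND PROOFS =====

-- alternating sum with a parity flag (reference form for both sides)
def termS : List Int → Bool → Int
  | [], _ => 0
  | t :: r, p => (if p then t else -t) + termS r (!p)

-- parity flip after consuming n elements
def flipN (n : Nat) (p : Bool) : Bool := if n % 2 = 0 then p else !p

-- the 'k * i' bonus A adds on the '+' steps, as a recursion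
def bonusS (i k0 : Int) : Nat → Bool → Int
  | 0, _ => 0
  | c + 1, add => (if add then k0 * i else 0) + bonusS i (k0 + 1) (c) (!add)

-- the sequence of entries A's inner loop reads, starting after k0
def idxSeq (sa : List Int) (m : Nat) (k0 : Int) : Nat → List Int
  | 0 => []
  | c + 1 => sa.getD ((PySem.Int.mod (k0 + 1) (m : Int)).toNat) 0 :: idxSeq sa m (k0 + 1) (c)

lemma set_getD_self (sa : List Int) (i : Nat) (h : i < sa.length) :
    sa.set i (sa.getD i 0) = sa := by
  rw [List.getD_eq_getElem sa 0 h]; exact List.set_getElem_self h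

-- (L1) characterisation of A's inner fold
lemma innerA_fold (m i : Nat) (him : i < m) :
    ∀ (c : Nat) (k0 : Int) (sa : List Int) (v : Int) (add : Bool),
    sa.length = m → (i : Int) ≤ k0 → k0 + c ≤ (m : Int) + i - 1 →
    ((PySem.List.pyRange k0 (k0 + c) 1).foldl (pyA_innerStep i) (sa.set i v, add)).1
    = sa.set i (v + termS (idxSeq sa m k0 c) add + bonusS (i : Int) k0 c add) := by
  intro c
  induction c with
  | zero =>
    intro k0 sa v add hm hk0 hub
    rw [show k0 + ((0 : Nat) : Int) = k0 by simp, PySem.List.pyRange_one_eq_nil le_rfl]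
    simp [termS, bonusS, idxSeq]
  | succ c ih =>
    intro k0 sa v add hm hk0 hub
    have hmpos : (0 : Int) < (m : Int) := by exact_mod_cast Nat.lt_of_le_of_lt (Nat.zero_le i) him
    have hk0nn : (0 : Int) ≤ k0 := le_trans (by exact_mod_cast Nat.zero_le i) hk0
    have hub' : k0 + 1 + (c : Int) ≤ (m : Int) + i - 1 := by push_cast at hub; omega
    have hcons : PySem.List.pyRange k0 (k0 + ((c + 1 : Nat) : Int)) 1
        = k0 :: PySem.List.pyRange (k0 + 1) ((k0 + 1) + (c : Int)) 1 := by
      rw [PySem.List.pyRange_one_cons (by push_cast; omega)]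
      congr 1
      push_cast
      ring_nf
    have hival : PySem.Int.mod (k0 + 1) (m : Int)
        = if k0 + 1 < (m : Int) then k0 + 1 else k0 + 1 - (m : Int) := by
      rw [PySem.Int.mod_eq_emod_of_pos hmpos]
      split_ifs with hlt
      · exact Int.emod_eq_of_lt (by omega) hlt
      · rw [← Int.sub_emod_right (k0 + 1) (m : Int)]
        exact Int.emod_eq_of_lt (by omega) (by omega)
    have hne : i ≠ (PySem.Int.mod (k0 + 1) (m : Int)).toNat := by
      rw [hival]
      split_ifs with hlt <;> omega
    have hnn : (0 : Int) ≤ PySem.Int.mod (k0 + 1) (m : Int) := PySem.Int.mod_nonneg _ hmpos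
    have hlen : PySem.List.len (sa.set i v) = (m : Int) := by
      simp [PySem.List.len_eq, hm]
    have hcur : PySem.List.pyGetD (sa.set i v) (i : Int) 0 = v := by
      rw [PySem.List.pyGetD_natCast]
      rw [List.getD_eq_getElem _ 0 (by simpa [hm] using him)]
      exact List.getElem_set_self (by simpa [hm] using him)
    have ht : PySem.List.pyGetD (sa.set i v) (PySem.Int.mod (k0 + 1) (m : Int)) 0
        = sa.getD ((PySem.Int.mod (k0 + 1) (m : Int)).toNat) 0 := by
      rw [PySem.List.pyGetD_of_nonneg _ _ hnn]
      simp [List.getD, List.getElem?_set_ne hne]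
    set t := sa.getD ((PySem.Int.mod (k0 + 1) (m : Int)).toNat) 0 with htdef
    have hset : ∀ X : Int, PySem.List.pySetD (sa.set i v) (i : Int) X = (sa.set i v).set i X :=
      fun X => PySem.List.pySetD_natCast _ _ _
    have hss : ∀ X : Int, (sa.set i v).set i X = sa.set i X := fun X => List.set_set ..
    have hstep : pyA_innerStep i (sa.set i v, add) k0
        = (sa.set i (if add then v + (t + k0 * (i : Int)) else v - t), !add) := by
      simp only [pyA_innerStep, hlen, hcur, ht, hset, hss]
    rw [hcons]
    rw [List.foldl_cons, hstep, ih (k0 + 1) sa _ (!add) hm (by omega) hub']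
    simp only [idxSeq, termS, bonusS, ← htdef]
    congr 1
    cases add <;> simp <;> ring_nf

-- (L2) the read sequence is exactly the rotation drop (i+1) ++ take i
lemma idxSeq_length (sa : List Int) (m : Nat) : ∀ (c : Nat) (k0 : Int),
    (idxSeq sa m k0 c).length = c := by
  intro c
  induction c with
  | zero => intro k0; simp [idxSeq]
  | succ c ih => intro k0; simp [idxSeq, ih]

lemma idxSeq_getElem (sa : List Int) (m : Nat) : ∀ (c : Nat) (k0 : Int) (j : Nat) (hj : j < c),
    (idxSeq sa m k0 c)[j]'(by rw [idxSeq_length]; exact hj)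
      = sa.getD ((PySem.Int.mod (k0 + 1 + (j : Int)) (m : Int)).toNat) 0 := by
  intro c
  induction c with
  | zero => intro k0 j hj; omega
  | succ c ih =>
    intro k0 j hj
    match j with
    | 0 => simp [idxSeq]
    | j + 1 =>
      have := ih (k0 + 1) j (by omega)
      simp only [idxSeq, List.getElem_cons_succ]
      rw [this]
      congr 2
      push_cast
      ring_nf

lemma idxSeq_eq_rot (sa : List Int) (m i : Nat) (hm : sa.length = m) (him : i < m) :
    idxSeq sa m (i : Int) (m - 1) = sa.drop (i + 1) ++ sa.take i := by
  apply List.ext_getElem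
  · rw [idxSeq_length]
    simp [hm]
    omega
  · intro j hj hj2
    rw [idxSeq_getElem sa m (m - 1) (i : Int) j (by rw [idxSeq_length] at hj; exact hj)]
    have hjm : j < m - 1 := by rwa [idxSeq_length] at hj
    have hmod : (PySem.Int.mod ((i : Int) + 1 + (j : Int)) (m : Int)).toNat
        = if j < m - 1 - i then i + 1 + j else i + 1 + j - m := by
      have hmpos : (0 : Int) < (m : Int) := by exact_mod_cast Nat.lt_of_le_of_lt (Nat.zero_le i) him
      rw [PySem.Int.mod_eq_emod_of_pos hmpos]
      split_ifs with hlt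
      · rw [Int.emod_eq_of_lt (by omega) (by omega)]
        omega
      · rw [← Int.sub_emod_right ((i : Int) + 1 + (j : Int)) (m : Int),
          Int.emod_eq_of_lt (by omega) (by omega)]
        omega
    rw [hmod]
    by_cases hlt : j < m - 1 - i
    · rw [if_pos hlt, List.getElem_append_left (by simp [hm]; omega),
        List.getElem_drop]
      rw [List.getD_eq_getElem _ 0 (by omega)]
    · rw [if_neg hlt, List.getElem_append_right (by simp [hm]; omega)]
      rw [List.getElem_take, List.getD_eq_getElem _ 0 (by omega)]
      congr 1
      simp [hm]
      omega

-- (L3) closed form of the bonus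
lemma bonusS_closed : ∀ (c : Nat) (k0 i : Int),
    bonusS i k0 c true = i * ((((c + 1) / 2 : Nat) : Int) * k0 + (((c + 1) / 2 : Nat) : Int) * ((((c + 1) / 2 : Nat) : Int) - 1)) ∧
    bonusS i k0 c false = i * (((c / 2 : Nat) : Int) * (k0 + 1) + ((c / 2 : Nat) : Int) * (((c / 2 : Nat) : Int) - 1)) := by
  intro c
  induction c with
  | zero => intro k0 i; simp [bonusS]
  | succ c ih =>
    intro k0 i
    constructor
    · have h2 : ((c + 1 + 1) / 2 : Nat) = (c / 2 : Nat) + 1 := by omega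
      simp only [bonusS, if_pos, Bool.not_true, (ih (k0 + 1) i).2, h2]
      push_cast
      ring_nf
    · simp only [bonusS, Bool.not_false, (ih (k0 + 1) i).1]
      simp

-- (L4) A's outer-loop step in termS form
lemma step_eq (m i : Nat) (him : i < m) (sa : List Int) (hm : sa.length = m) :
    pyA_inner i sa = sa.set i |sa.getD i 0 + termS (sa.drop (i + 1) ++ sa.take i) true
      + (i : Int) * (((m / 2 : Nat) : Int) * (i : Int) + ((m / 2 : Nat) : Int) * (((m / 2 : Nat) : Int) - 1))| := by
  have hmpos : 0 < m := Nat.lt_of_le_of_lt (Nat.zero_le i) him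
  have hilen : i < sa.length := by omega
  unfold pyA_inner
  have hrange : PySem.List.pyRange (i : Int) (PySem.List.len sa + (i : Int) - 1) 1
      = PySem.List.pyRange (i : Int) ((i : Int) + ((m - 1 : Nat) : Int)) 1 := by
    congr 1
    simp [PySem.List.len_eq, hm]
    push_cast [Nat.cast_sub (by omega : 1 ≤ m)]
    ring_nf
  have hinit : (sa, true) = (sa.set i (sa.getD i 0), true) := by
    rw [set_getD_self sa i hilen]
  dsimp only
  rw [hrange, hinit, innerA_fold m i him (m - 1) (i : Int) sa (sa.getD i 0) true hm le_rfl
    (by push_cast [Nat.cast_sub (by omega : 1 ≤ m)]; ring_nf; omega)]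
  set X := sa.getD i 0 + termS (idxSeq sa m (i : Int) (m - 1)) true + bonusS (i : Int) (i : Int) (m - 1) true with hX
  have hget : PySem.List.pyGetD (sa.set i X) (i : Int) 0 = X := by
    rw [PySem.List.pyGetD_natCast, List.getD_eq_getElem _ 0 (by simpa using hilen)]
    exact List.getElem_set_self (by simpa using hilen)
  rw [hget, PySem.List.pySetD_natCast, List.set_set]
  congr 1
  rw [hX, idxSeq_eq_rot sa m i hm him, (bonusS_closed (m - 1) (i : Int) (i : Int)).1]
  have : (m - 1 + 1) / 2 = m / 2 := by omega
  rw [this]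

-- (L5) B's alternating-total fold computes termS
lemma foldB_termS : ∀ (ts : List Int) (a : Int) (p : Bool),
    (ts.foldl (fun (st : Int × Bool) v =>
      ((if st.2 then st.1 + v else st.1 - v), !st.2)) (a, p)).1 = a + termS ts p := by
  intro ts
  induction ts with
  | nil => intro a p; simp [termS]
  | cons t r ih =>
    intro a p
    simp only [List.foldl_cons, termS, ih]
    cases p <;> simp <;> ring_nf

-- (L6) termS algebra
lemma termS_not : ∀ (xs : List Int) (p : Bool), termS xs (!p) = -termS xs p := by
  intro xs
  induction xs with
  | nil => intro p; simp [termS]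
  | cons x r ih =>
    intro p
    simp only [termS, Bool.not_not]
    have : termS r p = -termS r (!p) := by rw [ih]; ring
    rw [this]
    cases p <;> simp <;> ring

lemma termS_append : ∀ (xs ys : List Int) (p : Bool),
    termS (xs ++ ys) p = termS xs p + termS ys (flipN xs.length p) := by
  intro xs
  induction xs with
  | nil => intro ys p; simp [termS, flipN]
  | cons x r ih =>
    intro ys p
    simp only [List.cons_append, termS, ih, List.length_cons]
    have hf : flipN r.length (!p) = flipN (r.length + 1) p := by
      by_cases h : r.length % 2 = 0
      · have h2 : (r.length + 1) % 2 ≠ 0 := by omega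
        simp [flipN, h, h2]
      · have h2 : (r.length + 1) % 2 = 0 := by omega
        simp [flipN, h, h2]
    rw [hf]
    ring

lemma termS_flip_eps (xs : List Int) (k : Nat) :
    termS xs (flipN k true) = epsI k * termS xs true := by
  by_cases h : k % 2 = 0
  · simp [flipN, epsI, h]
  · have : flipN k true = !true := by simp [flipN, h]
    rw [this, termS_not]
    simp [epsI, h]

lemma epsI_sq (k : Nat) : epsI k * epsI k = 1 := by
  by_cases h : k % 2 = 0 <;> simp [epsI, h]

-- termS of a dropped suffix via prefixes
lemma termS_drop (l : List Int) (k : Nat) (hk : k ≤ l.length) :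
    termS (l.drop k) true = epsI k * (termS l true - termS (l.take k) true) := by
  have h := termS_append (l.take k) (l.drop k) true
  rw [List.take_append_drop] at h
  rw [List.length_take, Nat.min_eq_left hk] at h
  rw [termS_flip_eps] at h
  have h2 : epsI k * (termS l true - termS (l.take k) true)
      = epsI k * (epsI k * termS (l.drop k) true) := by rw [h]; ring
  rw [← mul_assoc, epsI_sq, one_mul] at h2
  exact h2.symm

-- prefix recurrence: termS (take (i+1)) = termS (take i) + eps i * l[i]
lemma termS_take_succ (l : List Int) (i : Nat) (hi : i < l.length) :
    termS (l.take (i + 1)) true = termS (l.take i) true + epsI i * l.getD i 0 := by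
  rw [List.take_succ]
  have : l[i]?.toList = [l[i]] := by simp [List.getElem?_eq_getElem hi]
  rw [this, termS_append, List.length_take, Nat.min_eq_left (by omega), termS_flip_eps]
  have h1 : termS [l[i]] true = l[i] := by simp [termS]
  rw [h1, List.getD_eq_getElem l 0 hi]

-- appending one value to the running alternating prefix Q
lemma termS_snoc (acc : List Int) (w : Int) :
    termS (acc ++ [w]) true = termS acc true + epsI acc.length * w := by
  rw [termS_append, termS_flip_eps]
  simp [termS]

-- helpers about acc ++ orig.drop i with acc.length = i
lemma set_append_len (acc : List Int) (x w : Int) (t : List Int) :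
    (acc ++ x :: t).set acc.length w = acc ++ w :: t := by
  induction acc with
  | nil => simp
  | cons a r ih => simp [List.set, ih]

-- (L7) the salt transforms agree: A's fold over pyA_inner = Source B's single pass
lemma salt_main (orig : List Int) (m : Nat) (hm : orig.length = m) :
    ∀ (c i : Nat) (acc : List Int) (Q Pr : Int), i + c = m → acc.length = i →
    Q = termS acc true → Pr = termS (orig.take i) true →
    (List.range' i c).foldl (fun sa j => pyA_inner j sa) (acc ++ orig.drop i)
      = ((List.range' i c).foldl (bStep orig m (termS orig true) ((m / 2 : Nat) : Int)) (acc, Q, Pr)).1 := by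
  intro c
  induction c with
  | zero =>
    intro i acc Q Pr hic hacc hQ hPr
    have : i = m := by omega
    subst this
    simp [List.drop_eq_nil_of_le (le_of_eq hm)]
  | succ c ih =>
    intro i acc Q Pr hic hacc hQ hPr
    have him : i < m := by omega
    have hil : i < orig.length := by omega
    have hgd : orig.getD i 0 = orig[i] := List.getD_eq_getElem orig 0 hil
    have hdrop : orig.drop i = orig.getD i 0 :: orig.drop (i + 1) := by
      rw [hgd]; exact List.drop_eq_getElem_cons hil
    have hlenfull : (acc ++ orig.drop i).length = m := by
      simp [hacc, hm]; omega
    rw [List.range'_succ]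
    simp only [List.foldl_cons]
    -- A's step in termS form
    rw [step_eq m i him _ hlenfull]
    -- identify the pieces of A's step
    have hget : (acc ++ orig.drop i).getD i 0 = orig.getD i 0 := by
      have h1 : (acc ++ orig.drop i).getD i 0 = (orig.drop i).getD (i - acc.length) 0 := by
        simp [List.getD, List.getElem?_append_right (show acc.length ≤ i by omega)]
      rw [h1, hacc, Nat.sub_self, hdrop]
      simp [List.getD]
    have htake : (acc ++ orig.drop i).take i = acc := by
      rw [← hacc]; exact List.take_left
    have hdrop1 : (acc ++ orig.drop i).drop (i + 1) = orig.drop (i + 1) := by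
      rw [hdrop, show acc ++ orig.getD i 0 :: orig.drop (i + 1) = (acc ++ [orig.getD i 0]) ++ orig.drop (i + 1) by simp]
      have hl : (acc ++ [orig.getD i 0]).length = i + 1 := by simp [hacc]
      rw [← hl]
      exact List.drop_left
    have hset : ∀ w, (acc ++ orig.drop i).set i w = (acc ++ [w]) ++ orig.drop (i + 1) := by
      intro w
      rw [hdrop, ← hacc, set_append_len]
      simp
    -- the alternating sum of the rotation, in prefix form
    have halt : termS (orig.drop (i + 1) ++ acc) true
        = epsI (i + 1) * (termS orig true - termS (orig.take (i + 1)) true)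
          + epsI (m - 1 - i) * Q := by
      rw [termS_append, List.length_drop, hm, termS_flip_eps,
        termS_drop orig (i + 1) (by omega), hQ,
        show m - (i + 1) = m - 1 - i from by omega]
    rw [hget, hdrop1, htake, halt]
    -- B's step
    have hPr2 : Pr + epsI i * orig.getD i 0 = termS (orig.take (i + 1)) true := by
      rw [hPr, ← termS_take_succ orig i hil]
    have hbstep : bStep orig m (termS orig true) ((m / 2 : Nat) : Int) (acc, Q, Pr) i
        = (acc ++ [|orig.getD i 0 + (epsI (i + 1) * (termS orig true - termS (orig.take (i + 1)) true)
            + epsI (m - 1 - i) * Q)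
            + (i : Int) * (((m / 2 : Nat) : Int) * (i : Int) + ((m / 2 : Nat) : Int) * (((m / 2 : Nat) : Int) - 1))|],
           Q + epsI i * |orig.getD i 0 + (epsI (i + 1) * (termS orig true - termS (orig.take (i + 1)) true)
            + epsI (m - 1 - i) * Q)
            + (i : Int) * (((m / 2 : Nat) : Int) * (i : Int) + ((m / 2 : Nat) : Int) * (((m / 2 : Nat) : Int) - 1))|,
           termS (orig.take (i + 1)) true) := by
      simp only [bStep, hPr2]
      have harg : orig.getD i 0 + epsI (i + 1) * (termS orig true - termS (orig.take (i + 1)) true)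
            + epsI (m - 1 - i) * Q
            + (i : Int) * (((m / 2 : Nat) : Int) * (i : Int) + ((m / 2 : Nat) : Int) * (((m / 2 : Nat) : Int) - 1))
          = orig.getD i 0 + (epsI (i + 1) * (termS orig true - termS (orig.take (i + 1)) true)
            + epsI (m - 1 - i) * Q)
            + (i : Int) * (((m / 2 : Nat) : Int) * (i : Int) + ((m / 2 : Nat) : Int) * (((m / 2 : Nat) : Int) - 1)) := by
        ring
      rw [harg]
    rw [hbstep, hset]
    set w := |orig.getD i 0 + (epsI (i + 1) * (termS orig true - termS (orig.take (i + 1)) true)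
            + epsI (m - 1 - i) * Q)
            + (i : Int) * (((m / 2 : Nat) : Int) * (i : Int) + ((m / 2 : Nat) : Int) * (((m / 2 : Nat) : Int) - 1))| with hw
    exact ih (i + 1) (acc ++ [w]) (Q + epsI i * w) (termS (orig.take (i + 1)) true)
      (by omega) (by simp [hacc]) (by rw [termS_snoc, hacc, hQ]) rfl

-- length and non-negativity of Source B's transformed salt array
lemma bStep_fold_shape (orig : List Int) (m : Nat) (total cnt : Int) :
    ∀ (l : List Nat) (acc : List Int) (Q Pr : Int), (∀ x ∈ acc, 0 ≤ x) →
    ((l.foldl (bStep orig m total cnt) (acc, Q, Pr)).1.length = acc.length + l.length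
      ∧ ∀ x ∈ (l.foldl (bStep orig m total cnt) (acc, Q, Pr)).1, 0 ≤ x) := by
  intro l
  induction l with
  | nil => intro acc Q Pr hnn; exact ⟨by simp, hnn⟩
  | cons i l ih =>
    intro acc Q Pr hnn
    simp only [List.foldl_cons, List.length_cons]
    have hlen1 : (bStep orig m total cnt (acc, Q, Pr) i).1.length = acc.length + 1 := by
      simp [bStep]
    have hnn1 : ∀ x ∈ (bStep orig m total cnt (acc, Q, Pr) i).1, 0 ≤ x := by
      intro x hx
      simp only [bStep, List.mem_append, List.mem_singleton] at hx
      rcases hx with h | h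
      · exact hnn x h
      · rw [h]; exact abs_nonneg _
    obtain ⟨h1, h2⟩ := ih (bStep orig m total cnt (acc, Q, Pr) i).1
      (bStep orig m total cnt (acc, Q, Pr) i).2.1 (bStep orig m total cnt (acc, Q, Pr) i).2.2 hnn1
    refine ⟨?_, h2⟩
    rw [show acc.length + (l.length + 1) = acc.length + 1 + l.length from by omega, ← hlen1]
    exact h1

-- ===== count-tree lemmas =====
def toListT : CTree → List Char
  | .leaf c => [c]
  | .node _ l r => toListT l ++ toListT r

def WFt : CTree → Prop
  | .leaf _ => True
  | .node c l r => c = (toListT l).length + (toListT r).length ∧ WFt l ∧ WFt r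

lemma toListT_ne_nil : ∀ t : CTree, toListT t ≠ [] := by
  intro t
  induction t with
  | leaf c => simp [toListT]
  | node c l r ihl ihr => simp [toListT]; intro h; exact absurd h ihl

lemma countT_eq (t : CTree) (h : WFt t) : countT t = (toListT t).length := by
  cases t with
  | leaf c => simp [countT, toListT]
  | node c l r => simp [countT, toListT]; exact h.1

lemma buildT_toList : ∀ (N : Nat) (l : List Char), l.length ≤ N → l ≠ [] →
    toListT (buildT l) = l ∧ WFt (buildT l) := by
  intro N
  induction N with
  | zero =>
    intro l hN hne
    exact absurd (List.length_eq_zero_iff.mp (by omega)) hne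
  | succ N ih =>
    intro l hN hne
    rw [buildT]
    split_ifs with h1
    · have h1' : l.length = 1 := by
        have := List.length_pos_iff.mpr hne
        omega
      obtain ⟨c, rfl⟩ := List.length_eq_one_iff.mp h1'
      simp [toListT, WFt]
    · have hlen : 2 ≤ l.length := by omega
      have htl : (l.take (l.length / 2)).length ≤ N := by
        simp only [List.length_take]; omega
      have hdl : (l.drop (l.length / 2)).length ≤ N := by
        simp only [List.length_drop]; omega
      have htn : l.take (l.length / 2) ≠ [] := by
        intro h
        have := congrArg List.length h
        simp only [List.length_take, List.length_nil] at this
        omega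
      have hdn : l.drop (l.length / 2) ≠ [] := by
        intro h
        have := congrArg List.length h
        simp only [List.length_drop, List.length_nil] at this
        omega
      obtain ⟨ht1, ht2⟩ := ih _ htl htn
      obtain ⟨hd1, hd2⟩ := ih _ hdl hdn
      refine ⟨?_, ?_, ht2, hd2⟩
      · simp [toListT, ht1, hd1]
      · rw [ht1, hd1]
        simp only [List.length_take, List.length_drop]
        omega

-- (L8) popT = Python's list.pop at index k
lemma popT_spec : ∀ (t : CTree) (k : Nat), WFt t → k < (toListT t).length →
    (popT t k).1 = (toListT t).getD k ' '
    ∧ ((popT t k).2.elim [] toListT) = (toListT t).eraseIdx k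
    ∧ (∀ t', (popT t k).2 = some t' → WFt t') := by
  intro t
  induction t with
  | leaf c =>
    intro k _ hk
    simp only [toListT, List.length_cons, List.length_nil] at hk
    have : k = 0 := by omega
    subst this
    simp [popT, toListT]
  | node cnt l r ihl ihr =>
    intro k hwf hk
    obtain ⟨hc, hwl, hwr⟩ := hwf
    have hcl : countT l = (toListT l).length := countT_eq l hwl
    simp only [toListT, List.length_append] at hk
    by_cases hkl : k < (toListT l).length
    · obtain ⟨ih1, ih2, ih3⟩ := ihl k hwl hkl
      have hgd : (toListT l ++ toListT r).getD k ' ' = (toListT l).getD k ' ' := by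
        simp [List.getD, List.getElem?_append_left hkl]
      have her : (toListT l ++ toListT r).eraseIdx k
          = (toListT l).eraseIdx k ++ toListT r :=
        List.eraseIdx_append_of_lt_length hkl _
      simp only [popT, hcl, if_pos hkl, toListT]
      rcases hpl : popT l k with ⟨ch, sub⟩
      rw [hpl] at ih1 ih2 ih3
      cases sub with
      | none =>
        simp only [Option.elim] at ih2
        refine ⟨by rw [hgd, ← ih1], ?_, ?_⟩
        · simp only [Option.elim, her, ← ih2]
          simp [toListT]
        · intro t' ht'
          simp only [Option.some.injEq] at ht'
          rw [← ht']; exact hwr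
      | some l' =>
        simp only [Option.elim] at ih2
        refine ⟨by rw [hgd, ← ih1], ?_, ?_⟩
        · simp only [Option.elim, her, toListT, ih2]
        · intro t' ht'
          simp only [Option.some.injEq] at ht'
          rw [← ht']
          refine ⟨?_, ih3 l' rfl, hwr⟩
          simp only [toListT] at *
          rw [ih2, List.length_eraseIdx_of_lt hkl]
          omega
    · have hkr : k - (toListT l).length < (toListT r).length := by omega
      obtain ⟨ih1, ih2, ih3⟩ := ihr (k - (toListT l).length) hwr hkr
      have hgd : (toListT l ++ toListT r).getD k ' '
          = (toListT r).getD (k - (toListT l).length) ' ' := by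
        simp [List.getD, List.getElem?_append_right (by omega : (toListT l).length ≤ k)]
      have her : (toListT l ++ toListT r).eraseIdx k
          = toListT l ++ (toListT r).eraseIdx (k - (toListT l).length) :=
        List.eraseIdx_append_of_length_le (by omega) _
      simp only [popT, hcl, if_neg hkl, toListT]
      rcases hpr : popT r (k - (toListT l).length) with ⟨ch, sub⟩
      rw [hpr] at ih1 ih2 ih3
      cases sub with
      | none =>
        simp only [Option.elim] at ih2
        refine ⟨by rw [hgd, ← ih1], ?_, ?_⟩
        · simp only [Option.elim, her, ← ih2]
          simp [toListT]
        · intro t' ht'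
          simp only [Option.some.injEq] at ht'
          rw [← ht']; exact hwl
      | some r' =>
        simp only [Option.elim] at ih2
        refine ⟨by rw [hgd, ← ih1], ?_, ?_⟩
        · simp only [Option.elim, her, toListT, ih2]
        · intro t' ht'
          simp only [Option.some.injEq] at ht'
          rw [← ht']
          refine ⟨?_, hwl, ih3 r' rfl⟩
          simp only [toListT] at *
          rw [ih2, List.length_eraseIdx_of_lt hkr]
          omega

-- (L9) A's while/pop loop = Source B's tree extraction loop
lemma extract_eq (sa : List Int) (sz : Nat) (hsz : 0 < sz) (hlen : sa.length = sz)
    (hnn : ∀ x ∈ sa, 0 ≤ x) (n : Nat) :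
    ∀ (c j : Nat) (t : CTree) (out : List Char), j + c = n → WFt t → (toListT t).length = c →
    extractB sa sz n j t out = pyA_while sa sz (toListT t) (j % sz) out := by
  intro c
  induction c with
  | zero =>
    intro j t out hjc hwf hlc
    exact absurd (List.length_eq_zero_iff.mp hlc) (toListT_ne_nil t)
  | succ c ih =>
    intro j t out hjc hwf hlc
    set chars := toListT t with hchars
    have hne : chars ≠ [] := toListT_ne_nil t
    have hjn : j < n := by omega
    have hjlt : j % sz < sz := Nat.mod_lt _ hsz
    have hjlen : j % sz < sa.length := by omega
    have hp0 : (0 : Int) ≤ sa.getD (j % sz) 0 := by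
      rw [List.getD_eq_getElem _ 0 hjlen]
      exact hnn _ (List.getElem_mem hjlen)
    have hnj : ((n : Int)) - ((j : Int)) = (c : Int) + 1 := by omega
    set p := PySem.Int.mod (sa.getD (j % sz) 0) ((n : Int) - (j : Int)) with hpdef
    have hppos : 0 ≤ p ∧ p < (c : Int) + 1 := by
      rw [hpdef, hnj]
      rw [hnj] at *
      exact ⟨PySem.Int.mod_nonneg _ (by omega), PySem.Int.mod_lt _ (by omega)⟩
    have hptlt : p.toNat < chars.length := by omega
    -- A's computed position equals p
    have hposeq : (if sa.getD (j % sz) 0 ≥ PySem.List.len chars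
          then PySem.Int.mod (sa.getD (j % sz) 0) (PySem.List.len chars)
          else sa.getD (j % sz) 0) = p := by
      rw [hpdef, PySem.List.len_eq, hlc, hnj]
      have : ((c + 1 : Nat) : Int) = (c : Int) + 1 := by push_cast; ring_nf
      rw [this]
      split_ifs with hge
      · rfl
      · rw [PySem.Int.mod_eq_emod_of_pos (by omega), Int.emod_eq_of_lt hp0 (by omega)]
    have hpop : PySem.List.pop? chars p = some (chars[p.toNat], chars.eraseIdx p.toNat) := by
      have h1 : p = ((p.toNat : Nat) : Int) := by omega
      have h2 := PySem.List.pop?_natCast chars p.toNat hptlt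
      rwa [← h1] at h2
    -- one step of A's while loop
    have hA : pyA_while sa sz chars (j % sz) out
        = pyA_while sa sz (chars.eraseIdx p.toNat) ((j + 1) % sz) (out ++ [chars[p.toNat]]) := by
      have hscrut : (if PySem.List.pyGetD sa ((j % sz : Nat) : Int) 0 ≥ PySem.List.len chars
            then PySem.Int.mod (PySem.List.pyGetD sa ((j % sz : Nat) : Int) 0) (PySem.List.len chars)
            else PySem.List.pyGetD sa ((j % sz : Nat) : Int) 0) = p := by
        rw [PySem.List.pyGetD_natCast]
        exact hposeq
      conv_lhs => rw [pyA_while]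
      simp only [if_neg hne]
      split
      · next heq => rw [hscrut, hpop] at heq; cases heq
      · next c' rest heq =>
        rw [hscrut, hpop] at heq
        injection heq with heq
        injection heq with h1 h2
        rw [h1, h2, Nat.mod_add_mod]
    -- B's step
    obtain ⟨hs1, hs2, hs3⟩ := popT_spec t p.toNat hwf hptlt
    rw [extractB]
    simp only [if_pos hjn, ← hpdef]
    have hchval : (popT t p.toNat).1 = chars[p.toNat] := by
      rw [hs1, List.getD_eq_getElem _ _ hptlt]
    rcases hpt : popT t p.toNat with ⟨ch, sub⟩
    rw [hpt] at hs1 hs2 hs3 hchval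
    dsimp only at hs1 hs2 hs3 hchval
    cases sub with
    | none =>
      simp only [Option.elim] at hs2
      have hred : (match ((ch : Char), (none : Option CTree)) with
          | (c, none) => out ++ [c]
          | (c, some t') => extractB sa sz n (j + 1) t' (out ++ [c])) = out ++ [ch] := rfl
      rw [hred, hA, ← hs2, hchval]
      rw [pyA_while]
      simp
    | some t' =>
      simp only [Option.elim] at hs2
      have hlt' : (toListT t').length = c := by
        rw [hs2, List.length_eraseIdx_of_lt hptlt, hlc]
        omega
      have hred : (match ((ch : Char), (some t' : Option CTree)) with
          | (c, none) => out ++ [c]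
          | (c, some t') => extractB sa sz n (j + 1) t' (out ++ [c]))
          = extractB sa sz n (j + 1) t' (out ++ [ch]) := rfl
      rw [hred, hA, hchval]
      rw [← hs2]
      exact ih (j + 1) t' (out ++ [chars[p.toNat]]) (by omega) (hs3 t' rfl) hlt'

-- ===== VERDICT (by name: the statement is the Claim_ definition above) =====
theorem consistentShuffle_py_spec : Claim_equal_consistentShuffle_py := by
  intro alphabet salt _hdom hpre
  unfold Spec_consistentShuffle_py consistentShuffle_py consistentShuffle_py_alt
  by_cases ha : alphabet.toList = []
  · simp [ha]
  · have hs : salt.toList ≠ [] := hpre.resolve_left ha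
    have hm0 : 0 < salt.toList.length := List.length_pos_iff.mpr hs
    simp only [if_neg ha]
    set orig := salt.toList.map (fun c => ((c.toNat : Int))) with horig
    set m := orig.length with hmdef
    have hmm : m = salt.toList.length := by rw [hmdef, horig, List.length_map]
    -- A's initial sorting array is the map B starts from
    have hinit : salt.toList.foldl (fun acc c => acc ++ [((c.toNat : Int))]) [] = orig := by
      simpa using PySem.List.foldl_append_singleton_eq_map
        (l := salt.toList) (f := fun c => ((c.toNat : Int))) (acc := [])
    rw [hinit]
    -- B's alternating total is termS orig true
    have htot : (orig.foldl (fun (st : Int × Bool) v =>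
        ((if st.2 then st.1 + v else st.1 - v), !st.2)) (0, true)).1 = termS orig true := by
      rw [foldB_termS]; ring
    rw [htot]
    -- salt transforms agree
    have hsalt := salt_main orig m rfl m 0 [] 0 0 (by omega) rfl (by simp [termS]) (by simp [termS])
    simp only [List.drop_zero, List.nil_append, ← List.range_eq_range'] at hsalt
    rw [hsalt]
    set SA := ((List.range m).foldl (bStep orig m (termS orig true) ((m / 2 : Nat) : Int)) ([], 0, 0)).1 with hSA
    obtain ⟨hlenSA, hnnSA⟩ := bStep_fold_shape orig m (termS orig true) ((m / 2 : Nat) : Int)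
      (List.range m) [] 0 0 (by simp)
    rw [← hSA] at hlenSA hnnSA
    simp only [List.length_nil, List.length_range, Nat.zero_add] at hlenSA
    -- extraction: tree loop = pop loop
    obtain ⟨hbl, hbw⟩ := buildT_toList alphabet.toList.length alphabet.toList le_rfl ha
    have hext := extract_eq SA m (by omega) hlenSA hnnSA alphabet.toList.length
      alphabet.toList.length 0 (buildT alphabet.toList) []
      (by omega) hbw (by rw [hbl])
    rw [Nat.zero_mod, hbl] at hext
    rw [hlenSA, ← hext]
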